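-- pv_equiv track=rewrite | github.com/agirar05/TP_CleanCode | app/main/service/create_id_service.py | create_complete_id
-- ===== SOURCE A (Python) =====
-- def create_complete_id(id):
--     numbers = id
--     if(int(numbers) < 10000000):
--         total = -1
--     else:
--         total = 100
--         while(total > 15):
--             total = 0
--             for number in numbers:
--                 total += int(number)
--             numbers = str(total)
--
--     letter = get_letter_by_total(total+1)
--     return letter + id
--
-- def get_letter_by_total(total):
--     letter_by_total = {
--         0: "Z",
--         1: "A",
--         2: "B",
--         3: "C",
--         4: "D",
--         5: "E",
--         6: "F",
--         7: "G",
--         8: "H",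
--         9: "I",
--         10: "J",
--         11: "K",
--         12: "L",
--         13: "M",
--         14: "N",
--         15: "O",
--         16: "P"
--     }
--     return letter_by_total[total]
-- ===== SOURCE B (Python) =====
-- def _reduce(s):
--     t = sum(int(d) for d in s)
--     return _reduce(str(t)) if t > 15 else t
--
-- def create_complete_id(id):
--     if int(id) < 10000000:
--         return "Z" + id
--     total = _reduce(id)
--     return chr(ord('A') + total) + id
-- ===== Notes on version B (the rewrite author's own statement) =====
-- stated objective: simpler
-- what changed: Replaces the sentinel-initialised while loop and the 17-entry letter dict with a small recursive digit-sum reduction and a closed-form chr arithmetic on the letter (Z for the small-id case).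
import Mathlib
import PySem

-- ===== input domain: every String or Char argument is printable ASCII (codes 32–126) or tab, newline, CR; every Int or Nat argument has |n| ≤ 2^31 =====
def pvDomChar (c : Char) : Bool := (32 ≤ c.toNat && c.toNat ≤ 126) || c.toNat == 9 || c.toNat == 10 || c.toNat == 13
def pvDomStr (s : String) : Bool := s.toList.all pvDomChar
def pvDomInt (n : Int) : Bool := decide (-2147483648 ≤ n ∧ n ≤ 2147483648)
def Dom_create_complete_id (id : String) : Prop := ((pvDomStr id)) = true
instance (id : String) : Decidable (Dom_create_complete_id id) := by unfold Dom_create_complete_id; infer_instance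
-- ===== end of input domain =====

-- B replaces A's sentinel-initialised while loop and 17-entry letter dict by a recursive
-- digit-sum reduction and a closed-form chr arithmetic on the letter (Z for small ids);
-- objective: simpler.

-- ===== PORT A =====
-- get_letter_by_total: the literal dict, get? (none = KeyError, outside Pre_)
def pvGetLetterByTotal (total : Int) : Option String :=
  (PySem.Dict.ofList [((0:Int),"Z"),(1,"A"),(2,"B"),(3,"C"),(4,"D"),(5,"E"),(6,"F"),
    (7,"G"),(8,"H"),(9,"I"),(10,"J"),(11,"K"),(12,"L"),(13,"M"),(14,"N"),(15,"O"),(16,"P")]).get? total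

-- 'total = 0; for number in numbers: total += int(number)' (none = ValueError from int(number))
def pvSumDigitsA (numbers : String) : Option Int :=
  numbers.toList.foldl
    (fun total number =>
      match total, PySem.Int.ofStr? (String.singleton number) with
      | some t, some d => some (t + d)
      | _, _ => none)
    (some 0)

-- 'while total > 15: …'; the fuel only makes the loop total (Python terminates on every
-- input Pre_ admits; the fuel supplied below is far above the handful of passes needed)
def pvWhileA (numbers : String) (total : Int) (fuel : Nat) : Option Int :=
  match fuel with
  | 0 => none
  | f + 1 =>
    if total > 15 then
      match pvSumDigitsA numbers with
      | none => none
      | some t => pvWhileA (PySem.Int.toStr t) t f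
    else some total

def create_complete_id (id : String) : String :=
  match PySem.Int.ofStr? id with
  | none => ""      -- int(id) raises ValueError: outside Pre_
  | some n =>
    match (if n < 10000000 then some (-1) else pvWhileA id 100 (id.length + 17)) with
    | none => ""    -- int(number) raises ValueError: outside Pre_
    | some total =>
      match pvGetLetterByTotal (total + 1) with
      | none => ""  -- KeyError: unreachable on inputs A returns on
      | some letter => letter ++ id

-- ===== PORT B =====
-- 'sum(int(d) for d in s)'
def pvSumDigitsB (s : String) : Option Int :=
  (s.toList.mapM (fun d => PySem.Int.ofStr? (String.singleton d))).map (fun ds => ds.sum)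

-- '_reduce(s)': recursive; fuel only for totality (see pvWhileA)
def pvReduceB (s : String) (fuel : Nat) : Option Int :=
  match fuel with
  | 0 => none
  | f + 1 =>
    match pvSumDigitsB s with
    | none => none
    | some t => if t > 15 then pvReduceB (PySem.Int.toStr t) f else some t

def create_complete_id_alt (id : String) : String :=
  match PySem.Int.ofStr? id with
  | none => ""
  | some n =>
    if n < 10000000 then "Z" ++ id
    else
      match pvReduceB id (id.length + 16) with
      | none => ""
      | some total => String.singleton (Char.ofNat (65 + total).toNat) ++ id

-- ===== PRECONDITION & SPEC =====
-- Pre_ excludes exactly the inputs where Python A raises: strings int() rejects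
-- (ValueError), and strings whose int value is ≥ 10000000 but that contain a
-- non-digit character (sign, space, underscore), on which int(number) raises.
def Pre_create_complete_id (id : String) : Prop :=
  (PySem.Int.ofStr? id).isSome = true ∧
    ((PySem.Int.ofStr? id).getD 0 < 10000000 ∨ ∀ c ∈ id.toList, c.isDigit = true)
instance (id : String) : Decidable (Pre_create_complete_id id) := by
  unfold Pre_create_complete_id; infer_instance

def pvWitness_create_complete_id : String := "7"

def Spec_create_complete_id (id : String) (out : String) : Prop := out = create_complete_id_alt id
instance (id : String) (out : String) : Decidable (Spec_create_complete_id id out) := by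
  unfold Spec_create_complete_id; infer_instance

-- ===== CLAIM (what is proved, stated in full; the proofs are below) =====
def Claim_equal_create_complete_id : Prop := ∀ (id : String), Dom_create_complete_id id → Pre_create_complete_id id → Spec_create_complete_id id (create_complete_id id)

-- ===== LEMMAS AND PROOFS =====

-- the loop body of pvSumDigitsA, named for the proofs
def pvStep (total : Option Int) (number : Char) : Option Int :=
  match total, PySem.Int.ofStr? (String.singleton number) with
  | some t, some d => some (t + d)
  | _, _ => none

theorem pvSumA_def (s : String) : pvSumDigitsA s = s.toList.foldl pvStep (some 0) := rfl

theorem pvStep_none (l : List Char) : l.foldl pvStep none = none := by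
  induction l with
  | nil => rfl
  | cons c l ih => simpa [pvStep] using ih

-- a single character parses to a non-negative value (int('c') is a digit value or ValueError)
theorem pvOfCharsSingletonNonneg (c : Char) (d : Int)
    (h : PySem.Int.ofStr? (String.singleton c) = some d) : 0 ≤ d := by
  by_cases hm : c = '-'
  · subst hm
    have hz : PySem.Int.ofStr? (String.singleton '-') = none := by decide
    simp [hz] at h
  by_cases hp : c = '+'
  · subst hp
    have hz : PySem.Int.ofStr? (String.singleton '+') = none := by decide
    simp [hz] at h
  · unfold PySem.Int.ofStr? at h
    rw [show (String.singleton c).toList = [c] by simp] at h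
    unfold PySem.Int.ofChars? at h
    by_cases hs : PySem.Int.isIntSpace c
    · simp only [List.dropWhile, hs] at h
      simp only [List.dropWhile_nil, List.reverse_nil] at h
      simp [Option.bind_eq_some_iff] at h
      obtain ⟨a, -, rfl⟩ := h
      exact Int.natCast_nonneg a
    · simp only [List.dropWhile, hs] at h
      simp only [List.reverse_singleton, List.dropWhile, hs] at h
      split at h
      · rename_i heq; simp at heq; exact absurd heq.1 hm
      · rename_i heq; simp at heq; exact absurd heq.1 hp
      · simp [Option.bind_eq_some_iff] at h
        obtain ⟨a, -, rfl⟩ := h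
        exact Int.natCast_nonneg a

theorem pvFoldlGe (l : List Char) : ∀ (a t : Int),
    l.foldl pvStep (some a) = some t → a ≤ t := by
  induction l with
  | nil => intro a t h; simp at h; omega
  | cons c l ih =>
    intro a t h
    simp only [List.foldl_cons] at h
    cases hc : PySem.Int.ofStr? (String.singleton c) with
    | none =>
      rw [show pvStep (some a) c = none by simp [pvStep, hc]] at h
      rw [pvStep_none] at h; cases h
    | some d =>
      have hd := pvOfCharsSingletonNonneg c d hc
      rw [show pvStep (some a) c = some (a + d) by simp [pvStep, hc]] at h
      have := ih (a + d) t h; omega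

theorem pvSumANonneg (s : String) (t : Int) (h : pvSumDigitsA s = some t) : 0 ≤ t := by
  rw [pvSumA_def] at h
  exact pvFoldlGe s.toList 0 t h

theorem pvSumGen (l : List Char) : ∀ (t : Int),
    l.foldl pvStep (some t) =
      (l.mapM (fun d => PySem.Int.ofStr? (String.singleton d))).map (fun ds => t + ds.sum) := by
  induction l with
  | nil => intro t; simp
  | cons c l ih =>
    intro t
    simp only [List.foldl_cons, List.mapM_cons]
    cases hc : PySem.Int.ofStr? (String.singleton c) with
    | none =>
      rw [show pvStep (some t) c = none by simp [pvStep, hc]]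
      rw [pvStep_none]
      simp
    | some d =>
      rw [show pvStep (some t) c = some (t + d) by simp [pvStep, hc]]
      rw [ih (t + d)]
      cases hml : l.mapM (fun d => PySem.Int.ofStr? (String.singleton d)) with
      | none => simp
      | some ds => simp; omega

theorem pvSumAB (s : String) : pvSumDigitsA s = pvSumDigitsB s := by
  rw [pvSumA_def]
  unfold pvSumDigitsB
  rw [pvSumGen s.toList 0]
  simp

theorem pvReduceBounds (f : Nat) : ∀ (s : String) (t : Int),
    pvReduceB s f = some t → 0 ≤ t ∧ t ≤ 15 := by
  induction f with
  | zero => intro s t h; simp [pvReduceB] at h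
  | succ f ih =>
    intro s t h
    unfold pvReduceB at h
    cases hs : pvSumDigitsB s with
    | none => rw [hs] at h; exact absurd h (by simp)
    | some u =>
      rw [hs] at h
      have h' : (if u > 15 then pvReduceB (PySem.Int.toStr u) f else some u) = some t := h
      have hu : 0 ≤ u := pvSumANonneg s u (by rw [pvSumAB, hs])
      by_cases h15 : u > 15
      · rw [if_pos h15] at h'; exact ih _ _ h'
      · rw [if_neg h15] at h'
        cases h'; exact ⟨hu, by omega⟩

theorem pvLoopEq (f : Nat) : ∀ (s : String) (t : Int), 15 < t →
    pvWhileA s t (f + 1) = pvReduceB s f := by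
  induction f with
  | zero =>
    intro s t ht
    unfold pvWhileA
    rw [if_pos (by omega : t > 15)]
    cases pvSumDigitsA s with
    | none => rfl
    | some u => rfl
  | succ f ih =>
    intro s t ht
    unfold pvWhileA
    rw [if_pos (by omega : t > 15)]
    cases hs : pvSumDigitsA s with
    | none =>
      have hb : pvSumDigitsB s = none := by rw [← pvSumAB]; exact hs
      show (none : Option Int) = pvReduceB s (f + 1)
      unfold pvReduceB; rw [hb]
    | some u =>
      have hb : pvSumDigitsB s = some u := by rw [← pvSumAB]; exact hs
      have hr : pvReduceB s (f + 1) =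
          (if u > 15 then pvReduceB (PySem.Int.toStr u) f else some u) := by
        conv_lhs => unfold pvReduceB
        rw [hb]
      show pvWhileA (PySem.Int.toStr u) u (f + 1) = pvReduceB s (f + 1)
      rw [hr]
      by_cases hu : u > 15
      · rw [if_pos hu]; exact ih _ _ (by omega)
      · rw [if_neg hu]
        unfold pvWhileA
        rw [if_neg hu]

theorem pvLetterEq (t : Int) (h0 : 0 ≤ t) (h15 : t ≤ 15) :
    pvGetLetterByTotal (t + 1) = some (String.singleton (Char.ofNat (65 + t).toNat)) := by
  interval_cases t <;> decide

-- ===== VERDICT (by name: the statement is the Claim_ definition above) =====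
theorem create_complete_id_spec : Claim_equal_create_complete_id := by
  intro id _ _
  unfold Spec_create_complete_id create_complete_id create_complete_id_alt
  cases hofs : PySem.Int.ofStr? id with
  | none => rfl
  | some n =>
    by_cases hn : n < 10000000
    · show (match (if n < 10000000 then some (-1) else pvWhileA id 100 (id.length + 17)) with
        | none => ""
        | some total =>
          match pvGetLetterByTotal (total + 1) with
          | none => ""
          | some letter => letter ++ id) = (if n < 10000000 then "Z" ++ id else _)
      rw [if_pos hn, if_pos hn]
      show (match pvGetLetterByTotal (-1 + 1) with
        | none => ""
        | some letter => letter ++ id) = "Z" ++ id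
      have hz : pvGetLetterByTotal (-1 + 1) = some "Z" := by decide
      rw [hz]
    · show (match (if n < 10000000 then some (-1) else pvWhileA id 100 (id.length + 17)) with
        | none => ""
        | some total =>
          match pvGetLetterByTotal (total + 1) with
          | none => ""
          | some letter => letter ++ id) =
        (if n < 10000000 then "Z" ++ id else
          match pvReduceB id (id.length + 16) with
          | none => ""
          | some total => String.singleton (Char.ofNat (65 + total).toNat) ++ id)
      rw [if_neg hn, if_neg hn]
      rw [show id.length + 17 = (id.length + 16) + 1 by omega]
      rw [pvLoopEq _ _ 100 (by omega)]
      cases hr : pvReduceB id (id.length + 16) with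
      | none => rfl
      | some t =>
        obtain ⟨h0, h15⟩ := pvReduceBounds _ _ _ hr
        show (match pvGetLetterByTotal (t + 1) with
          | none => ""
          | some letter => letter ++ id) =
          String.singleton (Char.ofNat (65 + t).toNat) ++ id
        rw [pvLetterEq t h0 h15]
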